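-- pv_equiv track=rewrite | github.com/IntelPython/scikit-learn_bench | daal4py_bench/svm.py | map_sv_to_columns_in_dual_coef_matrix
-- ===== SOURCE A (Python) =====
-- def map_sv_to_columns_in_dual_coef_matrix(sv_ind_by_class):
--     from collections import defaultdict
--     sv_ind_mapping = defaultdict(lambda: -1)
--     p = 0
--     for indices_per_class in sv_ind_by_class:
--         indices_per_class.sort()
--         for sv_index in indices_per_class:
--             if sv_ind_mapping[sv_index] == -1:
--                 sv_ind_mapping[sv_index] = p
--                 p += 1
--     return sv_ind_mapping
-- ===== SOURCE B (Python) =====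
-- def map_sv_to_columns_in_dual_coef_matrix(sv_ind_by_class):
--     from collections import defaultdict
--     for indices_per_class in sv_ind_by_class:
--         indices_per_class.sort()
--     flat = [v for cls in sv_ind_by_class for v in cls]
--     first_pos = {}
--     for p, v in reversed(list(enumerate(flat))):
--         first_pos[v] = p
--     sv_ind_mapping = defaultdict(lambda: -1)
--     for rank, v in enumerate(sorted(first_pos, key=first_pos.get)):
--         sv_ind_mapping[v] = rank
--     return sv_ind_mapping
-- ===== Notes on version B (the rewrite author's own statement) =====
-- stated objective: alternative
-- what changed: A numbers support vectors with a running counter inside an interleaved seen-check-and-assign loop; B uses a different algorithm: a backward overwrite pass records each index's first flat position in a dict with no membership test, and the columns come from sorting the distinct indices by that first position before numbering them.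
import Mathlib
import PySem

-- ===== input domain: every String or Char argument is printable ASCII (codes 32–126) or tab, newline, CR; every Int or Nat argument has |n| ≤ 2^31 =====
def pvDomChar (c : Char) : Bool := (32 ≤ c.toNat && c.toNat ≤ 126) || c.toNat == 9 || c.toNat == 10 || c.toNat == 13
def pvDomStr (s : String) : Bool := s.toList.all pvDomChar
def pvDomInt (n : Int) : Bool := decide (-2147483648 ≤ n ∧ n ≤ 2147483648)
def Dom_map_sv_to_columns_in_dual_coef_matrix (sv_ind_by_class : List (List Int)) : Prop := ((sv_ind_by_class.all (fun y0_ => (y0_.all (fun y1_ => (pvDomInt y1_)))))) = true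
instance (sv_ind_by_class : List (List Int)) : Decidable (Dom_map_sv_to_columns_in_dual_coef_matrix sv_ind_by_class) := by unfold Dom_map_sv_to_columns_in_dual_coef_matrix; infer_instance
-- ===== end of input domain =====

-- B replaces A's interleaved check-and-assign loop with a different algorithm: a backward
-- overwrite pass records each index's FIRST flat position (no membership test), and the column
-- numbers come from SORTING the distinct indices by that first position; same asymptotic cost.
-- Both Pythons sort each inner list of the argument IN PLACE; the equivalence proved is about
-- the returned mapping.


-- ===== PORT A =====
-- body of A's inner loop: `sv_ind_mapping[sv_index]` on a defaultdict is setdefault(x, -1)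
-- followed by the lookup; the branch then overwrites with p and bumps p
def pvStepA (st : PySem.Dict Int Int × Int) (x : Int) : PySem.Dict Int Int × Int :=
  let d := st.1.setdefault x (-1)
  if d.getD x (-1) == -1 then (d.insert x st.2, st.2 + 1) else (d, st.2)

def map_sv_to_columns_in_dual_coef_matrix (sv_ind_by_class : List (List Int)) : List (Int × Int) :=
  (sv_ind_by_class.foldl
    (fun st indices_per_class =>
      (PySem.List.sorted indices_per_class (fun x => x) false).foldl pvStepA st)
    (PySem.Dict.empty, 0)).1.items

-- ===== PORT B =====
-- `first_pos.get` on a key of the dict is the stored value: ported as getD with an unused default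
def map_sv_to_columns_in_dual_coef_matrix_alt (sv_ind_by_class : List (List Int)) : List (Int × Int) :=
  let flat := (sv_ind_by_class.map (fun cls => PySem.List.sorted cls (fun x => x) false)).flatMap
    (fun cls => cls)
  let firstPos := (PySem.List.enumerate flat 0).reverse.foldl
    (fun (d : PySem.Dict Int Int) pv => d.insert pv.2 pv.1) PySem.Dict.empty
  let order := PySem.List.sorted firstPos.keys (fun v => firstPos.getD v 0) false
  ((PySem.List.enumerate order 0).foldl
    (fun (d : PySem.Dict Int Int) iv => d.insert iv.2 iv.1) PySem.Dict.empty).items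

-- ===== PRECONDITION & SPEC =====
def Spec_map_sv_to_columns_in_dual_coef_matrix (sv_ind_by_class : List (List Int)) (out : List (Int × Int)) : Prop := out = map_sv_to_columns_in_dual_coef_matrix_alt sv_ind_by_class
instance (sv_ind_by_class : List (List Int)) (out : List (Int × Int)) : Decidable (Spec_map_sv_to_columns_in_dual_coef_matrix sv_ind_by_class out) := by unfold Spec_map_sv_to_columns_in_dual_coef_matrix; infer_instance

-- ===== CLAIM (what is proved, stated in full; the proofs are below) =====
def Claim_equal_map_sv_to_columns_in_dual_coef_matrix : Prop := ∀ (sv_ind_by_class : List (List Int)), Dom_map_sv_to_columns_in_dual_coef_matrix sv_ind_by_class → Spec_map_sv_to_columns_in_dual_coef_matrix sv_ind_by_class (map_sv_to_columns_in_dual_coef_matrix sv_ind_by_class)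

-- ===== LEMMAS AND PROOFS =====

-- the canonical items list: each element of `acc` paired with its position
def pvEnumPairs (acc : List Int) : List (Int × Int) :=
  (PySem.List.enumerate acc 0).map (fun iv => (iv.2, iv.1))

theorem pvEnumerate_append_singleton (xs : List Int) (x : Int) (s : Int) :
    PySem.List.enumerate (xs ++ [x]) s = PySem.List.enumerate xs s ++ [(s + xs.length, x)] := by
  induction xs generalizing s with
  | nil => simp [PySem.List.enumerate_cons, PySem.List.enumerate_nil]
  | cons y ys ih => simp [PySem.List.enumerate_cons, ih]; ring_nf

theorem pvKeys_enumPairs (acc : List Int) :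
    (PySem.Dict.mk (pvEnumPairs acc)).keys = acc := by
  show (pvEnumPairs acc).map (·.1) = acc
  rw [pvEnumPairs, List.map_map]
  exact PySem.List.map_snd_enumerate acc 0

-- one step of A's loop, on the canonical state of a seen-list `acc`, is `PySem.Set.add`
theorem pvStepA_canon (acc : List Int) (hnd : acc.Nodup) (x : Int) :
    pvStepA (PySem.Dict.mk (pvEnumPairs acc), (acc.length : Int)) x =
      (PySem.Dict.mk (pvEnumPairs (PySem.Set.add acc x)),
       ((PySem.Set.add acc x).length : Int)) := by
  have hkeys := pvKeys_enumPairs acc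
  have hknd : (PySem.Dict.mk (pvEnumPairs acc)).keys.Nodup := by rw [hkeys]; exact hnd
  have hcont : (PySem.Dict.mk (pvEnumPairs acc)).contains x = decide (x ∈ acc) := by
    rw [PySem.Dict.contains_eq_decide_mem_keys, hkeys]
  by_cases hx : x ∈ acc
  · -- existing key: the looked-up value is a nonnegative index, nothing changes
    obtain ⟨p, hp, hpx⟩ : ∃ p ∈ PySem.List.enumerate acc 0, p.2 = x := by
      have hxm : x ∈ (PySem.List.enumerate acc 0).map (·.2) := by
        rw [PySem.List.map_snd_enumerate]; exact hx
      obtain ⟨p, hp, hpx⟩ := List.mem_map.1 hxm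
      exact ⟨p, hp, hpx⟩
    have hp1 : 0 ≤ p.1 := by
      have hm : p.1 ∈ (PySem.List.enumerate acc 0).map (·.1) := List.mem_map_of_mem hp
      rw [PySem.List.map_fst_enumerate] at hm
      exact (PySem.List.mem_pyRange_one.1 hm).1
    have hmem : (x, p.1) ∈ pvEnumPairs acc := by
      rw [pvEnumPairs]
      exact List.mem_map.2 ⟨p, hp, by simp [hpx]⟩
    have hgetD : (PySem.Dict.mk (pvEnumPairs acc)).getD x (-1) = p.1 :=
      PySem.Dict.getD_of_mem_items _ hmem hknd (-1)
    have hc : (PySem.Dict.mk (pvEnumPairs acc)).contains x = true := by simp [hcont, hx]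
    have hsd := PySem.Dict.setdefault_of_contains _ (-1) hc
    simp only [pvStepA, hsd, hgetD]
    rw [if_neg (by simp; omega), PySem.Set.add_of_mem hx]
  · -- new key: defaultdict appends (x, -1), the branch overwrites it with p in place
    have hc : (PySem.Dict.mk (pvEnumPairs acc)).contains x = false := by simp [hcont, hx]
    have hsd := PySem.Dict.setdefault_of_not_contains _ (-1) hc
    simp only [pvStepA, hsd]
    rw [PySem.Dict.getD_insert_self, if_pos (by simp)]
    rw [PySem.Dict.insert_insert_self, PySem.Set.add_of_not_mem hx]
    refine Prod.ext ?_ ?_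
    · apply PySem.Dict.ext
      rw [PySem.Dict.items_insert_of_not_contains _ _ hc]
      show pvEnumPairs acc ++ [(x, (acc.length : Int))] = pvEnumPairs (acc ++ [x])
      rw [pvEnumPairs, pvEnumPairs, pvEnumerate_append_singleton]
      simp
    · simp

-- A's fold over one flat list, from the canonical state of `acc`, lands in the canonical
-- state of the ordered-dedup extension `PySem.Set.update acc L`
theorem pvFoldA (L acc : List Int) (hnd : acc.Nodup) :
    L.foldl pvStepA (PySem.Dict.mk (pvEnumPairs acc), (acc.length : Int)) =
      (PySem.Dict.mk (pvEnumPairs (PySem.Set.update acc L)),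
       ((PySem.Set.update acc L).length : Int)) := by
  induction L generalizing acc with
  | nil => simp [PySem.Set.update]
  | cons y ys ih =>
      rw [List.foldl_cons, pvStepA_canon acc hnd y,
        ih (PySem.Set.add acc y) (PySem.Set.nodup_add acc y hnd)]
      rfl

-- ===== B-side: the first-occurrence dict =====

-- first flat position of v among the entries enumerated from s (none if absent)
def pvFirst (xs : List Int) (s : Int) (v : Int) : Option Int :=
  ((PySem.List.enumerate xs s).find? (fun pv => pv.2 == v)).map (·.1)

theorem pvFirst_cons (x : Int) (xs : List Int) (s v : Int) :
    pvFirst (x :: xs) s v = if x = v then some s else pvFirst xs (s + 1) v := by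
  by_cases h : x = v <;>
    simp [pvFirst, PySem.List.enumerate_cons, h]

theorem pvFirst_ge (xs : List Int) (s v : Int) (hv : v ∈ xs) :
    ∃ i, pvFirst xs s v = some i ∧ s ≤ i := by
  induction xs generalizing s with
  | nil => cases hv
  | cons x xs ih =>
      rw [pvFirst_cons]
      by_cases hx : x = v
      · exact ⟨s, by simp [hx], le_refl s⟩
      · have hv' : v ∈ xs := by cases hv with
          | head => exact absurd rfl hx
          | tail _ h => exact h
        obtain ⟨i, hi, hsi⟩ := ih (s + 1) hv'
        exact ⟨i, by simp [hx, hi], by omega⟩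

-- B's backward-overwrite fold: each key holds its FIRST position
theorem pvRevFoldGet (xs : List Int) (s v : Int) :
    ((PySem.List.enumerate xs s).reverse.foldl
        (fun (d : PySem.Dict Int Int) pv => d.insert pv.2 pv.1) PySem.Dict.empty).get? v
      = pvFirst xs s v := by
  induction xs generalizing s with
  | nil => simp [PySem.List.enumerate_nil, pvFirst]
  | cons x xs ih =>
      rw [PySem.List.enumerate_cons, List.reverse_cons, List.foldl_append, pvFirst_cons]
      simp only [List.foldl_cons, List.foldl_nil]
      rw [PySem.Dict.get?_insert]
      by_cases hx : x = v
      · simp [hx]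
      · simp only [if_neg (Ne.symm hx), if_neg hx]
        exact ih (s + 1)

-- the ordered dedup is pairwise strictly increasing under the first-position key
theorem pvOfList_pairwise_first (xs : List Int) (s : Int) :
    (PySem.Set.ofList xs).Pairwise
      (fun a b => (pvFirst xs s a).getD 0 < (pvFirst xs s b).getD 0) := by
  induction xs generalizing s with
  | nil => simp [PySem.Set.ofList]
  | cons x xs ih =>
      rw [PySem.Set.ofList_cons]
      constructor
      · intro b hb
        have hbx : b ≠ x := ((PySem.Set.mem_discard _ _ _).1 hb).2
        have hbm : b ∈ xs := (PySem.Set.mem_ofList xs b).1 ((PySem.Set.mem_discard _ _ _).1 hb).1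
        obtain ⟨i, hi, hsi⟩ := pvFirst_ge xs (s + 1) b hbm
        rw [pvFirst_cons, pvFirst_cons, if_pos rfl, if_neg (Ne.symm hbx), hi]
        simp; omega
      · have hsub : List.Sublist (PySem.Set.discard (PySem.Set.ofList xs) x)
            (PySem.Set.ofList xs) := by
          rw [PySem.Set.discard]; exact List.filter_sublist
        refine ((ih (s + 1)).sublist hsub).imp_of_mem ?_
        intro a b ha hb hab
        have hax : a ≠ x := ((PySem.Set.mem_discard _ _ _).1 ha).2
        have hbx : b ≠ x := ((PySem.Set.mem_discard _ _ _).1 hb).2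
        rwa [pvFirst_cons, pvFirst_cons, if_neg (Ne.symm hax),
          if_neg (Ne.symm hbx)]

-- ===== VERDICT (by name: the statement is the Claim_ definition above) =====
theorem map_sv_to_columns_in_dual_coef_matrix_spec : Claim_equal_map_sv_to_columns_in_dual_coef_matrix := by
  intro svs _
  show map_sv_to_columns_in_dual_coef_matrix svs = map_sv_to_columns_in_dual_coef_matrix_alt svs
  rw [map_sv_to_columns_in_dual_coef_matrix, map_sv_to_columns_in_dual_coef_matrix_alt]
  -- both sides process the same flat list
  set flat := (svs.map (fun cls => PySem.List.sorted cls (fun x => x) false)).flatMap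
    (fun cls => cls) with hf
  -- A side: fold over classes = fold over the flattening, landing in the canonical state
  have hflat : svs.foldl
      (fun st indices_per_class =>
        (PySem.List.sorted indices_per_class (fun x => x) false).foldl pvStepA st)
      (PySem.Dict.empty, 0) = flat.foldl pvStepA (PySem.Dict.empty, 0) := by
    rw [hf, List.flatMap_id', List.foldl_flatten, List.foldl_map]
  have h0 : (PySem.Dict.empty, (0 : Int)) =
      (PySem.Dict.mk (pvEnumPairs []), (([] : List Int).length : Int)) := rfl
  rw [hflat, h0, pvFoldA flat [] List.nodup_nil]
  set o := PySem.Set.update [] flat with ho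
  have hoofl : o = PySem.Set.ofList flat := rfl
  have hond : o.Nodup := by rw [hoofl]; exact PySem.Set.nodup_ofList flat
  -- B side: the first-position dict
  set d := (PySem.List.enumerate flat 0).reverse.foldl
    (fun (d : PySem.Dict Int Int) pv => d.insert pv.2 pv.1) PySem.Dict.empty with hd
  have hkeys : d.keys = PySem.Set.ofList flat.reverse := by
    have h1 := PySem.Dict.keys_foldl_insert_key (ν := Int)
      ((PySem.List.enumerate flat 0).reverse) (fun pv => pv.2) (fun _ pv => pv.1)
      PySem.Dict.empty
    have h2 : (PySem.List.enumerate flat 0).reverse.map (fun pv => pv.2) = flat.reverse := by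
      rw [List.map_reverse, PySem.List.map_snd_enumerate]
    rw [h2] at h1
    rw [hd]
    exact h1.trans (by rfl)
  have hknd : d.keys.Nodup := by rw [hkeys]; exact PySem.Set.nodup_ofList _
  -- B's sorted order is exactly the ordered dedup o
  have horder : PySem.List.sorted d.keys (fun v => d.getD v 0) false = o := by
    apply PySem.List.sorted_eq_of_perm_of_pairwise_lt
    · exact (List.perm_ext_iff_of_nodup hond hknd).2 (by
        intro a
        rw [hkeys, hoofl, PySem.Set.mem_ofList, PySem.Set.mem_ofList, List.mem_reverse])
    · have hp := pvOfList_pairwise_first flat 0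
      rw [← hoofl] at hp
      refine hp.imp_of_mem ?_
      intro a b ha hb hab
      have ham : a ∈ flat := by
        rw [hoofl, PySem.Set.mem_ofList] at ha; exact ha
      have hbm : b ∈ flat := by
        rw [hoofl, PySem.Set.mem_ofList] at hb; exact hb
      obtain ⟨i, hi, _⟩ := pvFirst_ge flat 0 a ham
      obtain ⟨j, hj, _⟩ := pvFirst_ge flat 0 b hbm
      rw [PySem.Dict.getD_eq_get?_getD, PySem.Dict.getD_eq_get?_getD,
        hd, pvRevFoldGet flat 0 a, pvRevFoldGet flat 0 b, hi, hj]
      rw [hi, hj] at hab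
      simpa using hab
  rw [horder]
  -- numbering o with fresh distinct keys from the empty dict appends the canonical items
  rw [PySem.Dict.items_foldl_insert_fresh (PySem.List.enumerate o 0)
      (fun a => a.2) (fun a => a.1) PySem.Dict.empty
      (by intro a _; simp)
      (by rw [PySem.List.map_snd_enumerate]; exact hond)]
  rfl
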